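-- pv_equiv track=rewrite | github.com/csvila/AdventOfCode | 2019/Python/puzzle01_02.py | fuel4fuelmass
-- ===== SOURCE A (Python) =====
-- from math import floor
--
-- def fuel4fuelmass(rocket_fuel):
--     sum_fuel = 0
--     for fuel in rocket_fuel:
--         new_fuel = fuel
--         while True:
--             new_fuel = calc_fuel(new_fuel)
--             if new_fuel > 0:
--                 sum_fuel += new_fuel
--             else:
--                 break
--     return sum_fuel
--
-- def calc_fuel(mass):
--     return floor(int(mass)/3) - 2
-- ===== SOURCE B (Python) =====
-- def fuel4fuelmass(rocket_fuel):
--     total = 0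
--     level = [f for f in (int(m) // 3 - 2 for m in rocket_fuel) if f > 0]
--     while level:
--         total += sum(level)
--         level = [f for f in (m // 3 - 2 for m in level) if f > 0]
--     return total
-- ===== Notes on version B (the rewrite author's own statement) =====
-- stated objective: alternative
-- what changed: Computes the total level-by-level: repeatedly maps the fuel step over the whole surviving list of positive fuels and adds each generation's sum, instead of A's per-mass inner while loop with a global accumulator.
import Mathlib
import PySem

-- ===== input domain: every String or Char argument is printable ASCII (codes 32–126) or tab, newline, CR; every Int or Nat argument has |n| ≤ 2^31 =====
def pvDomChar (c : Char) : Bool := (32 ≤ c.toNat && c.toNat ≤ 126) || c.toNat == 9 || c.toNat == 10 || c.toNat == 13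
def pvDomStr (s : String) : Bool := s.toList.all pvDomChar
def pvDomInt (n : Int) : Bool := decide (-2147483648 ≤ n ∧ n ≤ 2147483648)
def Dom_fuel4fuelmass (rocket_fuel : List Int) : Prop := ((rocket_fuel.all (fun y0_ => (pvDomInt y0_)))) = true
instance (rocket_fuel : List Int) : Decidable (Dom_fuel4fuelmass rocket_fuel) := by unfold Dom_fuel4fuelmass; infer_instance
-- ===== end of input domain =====

-- B totals the fuel level-by-level (one list of surviving positive fuels per generation)
-- instead of A's per-mass inner while loop (objective: alternative algorithm, same cost).


-- ===== PORT A =====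
-- calc_fuel(mass) = floor(int(mass)/3) - 2; on |mass| ≤ 2^31 the float division is exact
-- enough that floor(mass/3) = mass // 3, ported as PySem.Int.floordiv.
def calcFuel (mass : Int) : Int := PySem.Int.floordiv mass 3 - 2

theorem calcFuel_toNat_lt (m : Int) (h : 0 < calcFuel m) : (calcFuel m).toNat < m.toNat := by
  have hq := PySem.Int.floordiv_mul_add_mod m 3
  have hr0 : 0 ≤ PySem.Int.mod m 3 := by
    have := PySem.Int.mod_eq_emod_of_pos (a := m) (b := 3) (by norm_num)
    rw [this]; exact Int.emod_nonneg m (by norm_num)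
  have hr3 : PySem.Int.mod m 3 < 3 := by
    have := PySem.Int.mod_eq_emod_of_pos (a := m) (b := 3) (by norm_num)
    rw [this]; exact Int.emod_lt_of_pos m (by norm_num)
  unfold calcFuel at *
  omega

-- the inner `while True` loop: updates new_fuel and the running sum_fuel until new_fuel ≤ 0
def whileLoopA (new_fuel sum_fuel : Int) : Int :=
  let nf := calcFuel new_fuel
  if h : nf > 0 then whileLoopA nf (sum_fuel + nf) else sum_fuel
termination_by new_fuel.toNat
decreasing_by exact calcFuel_toNat_lt new_fuel h

def fuel4fuelmass (rocket_fuel : List Int) : Int :=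
  rocket_fuel.foldl (fun sum_fuel fuel => whileLoopA fuel sum_fuel) 0

-- ===== PORT B =====
-- one generation: apply the fuel step to every element, keep the positive results
def stepB (level : List Int) : List Int :=
  (level.map fun m => PySem.Int.floordiv m 3 - 2).filter (fun f => f > 0)

-- termination measure for the level loop (used by whileLevels via decreasing_by)
def pvMu (xs : List Int) : Nat := (xs.map (fun m => m.toNat + 1)).sum

theorem stepB_cons (m : Int) (rest : List Int) :
    stepB (m :: rest) = if 0 < calcFuel m then calcFuel m :: stepB rest else stepB rest := by
  by_cases h : 0 < calcFuel m
  · have hd : PySem.Int.floordiv m 3 - 2 > 0 := h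
    simp [stepB, List.filter_cons, calcFuel, hd]
  · have hd : ¬ PySem.Int.floordiv m 3 - 2 > 0 := h
    simp [stepB, List.filter_cons, calcFuel, hd]

theorem pvMu_step_le (xs : List Int) : pvMu (stepB xs) ≤ pvMu xs := by
  induction xs with
  | nil => simp [stepB, pvMu]
  | cons m rest ih =>
      rw [stepB_cons]
      by_cases h : 0 < calcFuel m
      · have := calcFuel_toNat_lt m h
        simp only [if_pos h, pvMu, List.map_cons, List.sum_cons] at *
        omega
      · simp only [if_neg h, pvMu, List.map_cons, List.sum_cons] at *
        omega

theorem pvMu_step_lt (xs : List Int) (hne : xs ≠ []) : pvMu (stepB xs) < pvMu xs := by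
  cases xs with
  | nil => exact absurd rfl hne
  | cons m rest =>
      rw [stepB_cons]
      have hle := pvMu_step_le rest
      by_cases h : 0 < calcFuel m
      · have := calcFuel_toNat_lt m h
        simp only [if_pos h, pvMu, List.map_cons, List.sum_cons] at *
        omega
      · simp only [if_neg h, pvMu, List.map_cons, List.sum_cons] at *
        omega

-- the `while level:` loop with accumulator total
def whileLevels (level : List Int) (total : Int) : Int :=
  if h : level = [] then total
  else whileLevels (stepB level) (total + level.sum)
termination_by pvMu level
decreasing_by exact pvMu_step_lt level h

def fuel4fuelmass_alt (rocket_fuel : List Int) : Int :=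
  whileLevels (stepB rocket_fuel) 0

-- ===== PRECONDITION & SPEC =====
def Spec_fuel4fuelmass (rocket_fuel : List Int) (out : Int) : Prop := out = fuel4fuelmass_alt rocket_fuel
instance (rocket_fuel : List Int) (out : Int) : Decidable (Spec_fuel4fuelmass rocket_fuel out) := by unfold Spec_fuel4fuelmass; infer_instance

-- ===== CLAIM (what is proved, stated in full; the proofs are below) =====
def Claim_equal_fuel4fuelmass : Prop := ∀ (rocket_fuel : List Int), Dom_fuel4fuelmass rocket_fuel → Spec_fuel4fuelmass rocket_fuel (fuel4fuelmass rocket_fuel)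

-- ===== LEMMAS AND PROOFS =====
-- proof-side bridge: the per-mass iterated fuel
def chained (mass : Int) : Int :=
  let f := calcFuel mass
  if h : f > 0 then f + chained f else 0
termination_by mass.toNat
decreasing_by exact calcFuel_toNat_lt mass h

theorem whileLoopA_eq_chained (new_fuel acc : Int) : whileLoopA new_fuel acc = acc + chained new_fuel := by
  rw [whileLoopA, chained]
  show _ = acc + if _ : calcFuel new_fuel > 0 then calcFuel new_fuel + chained (calcFuel new_fuel) else 0
  by_cases h : calcFuel new_fuel > 0
  · rw [dif_pos h, dif_pos h, whileLoopA_eq_chained]; ring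
  · rw [dif_neg h, dif_neg h]; ring
termination_by new_fuel.toNat
decreasing_by exact calcFuel_toNat_lt _ h

theorem foldl_eq_sum_map (xs : List Int) : ∀ acc : Int,
    xs.foldl (fun s fuel => whileLoopA fuel s) acc = acc + (xs.map chained).sum := by
  induction xs with
  | nil => intro acc; simp
  | cons x xs ih =>
      intro acc
      rw [List.foldl_cons, whileLoopA_eq_chained, ih, List.map_cons, List.sum_cons]
      ring

theorem unfold_step (xs : List Int) :
    (xs.map chained).sum = (stepB xs).sum + ((stepB xs).map chained).sum := by
  induction xs with
  | nil => simp [stepB]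
  | cons m rest ih =>
      rw [List.map_cons, List.sum_cons, stepB_cons, chained]
      by_cases h : 0 < calcFuel m
      · rw [dif_pos h, if_pos h, List.sum_cons, List.map_cons, List.sum_cons, ih]; ring
      · rw [dif_neg h, if_neg h, ih]; ring

theorem whileLevels_stepB (xs : List Int) : ∀ acc : Int,
    whileLevels (stepB xs) acc = acc + (xs.map chained).sum := by
  by_cases hxs : xs = []
  · subst hxs; intro acc; simp [stepB, whileLevels]
  · intro acc
    rw [whileLevels]
    by_cases hs : stepB xs = []
    · rw [dif_pos hs]
      have h := unfold_step xs
      rw [hs] at h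
      simp at h
      rw [h]; ring
    · rw [dif_neg hs, whileLevels_stepB (stepB xs), unfold_step xs]; ring
termination_by pvMu xs
decreasing_by exact pvMu_step_lt xs hxs

-- ===== VERDICT (by name: the statement is the Claim_ definition above) =====
theorem fuel4fuelmass_spec : Claim_equal_fuel4fuelmass := by
  intro rocket_fuel _
  unfold Spec_fuel4fuelmass fuel4fuelmass fuel4fuelmass_alt
  rw [foldl_eq_sum_map, whileLevels_stepB]
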